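-- pv_equiv track=rewrite | github.com/cnrmck/hotdice | .backup/hot_dice.py | scoreMultiples
-- ===== SOURCE A (Python) =====
-- score_multiple = {"1":1000, "2":200, "3":300, "4":400, "5":500, "6":600}
--
-- def scoreMultiples(dice):
--     score = 0
--     for num in range(1,7):
--         count = 0
--         dice_copy = dice.copy()
--         for i in range(len(dice_copy)):
--             if (dice_copy[i] == num): # add and num != 2 to not count twos
--                 count += 1
--                 dice_copy[i] = 0
--         if (count > 2):
--             score += (count - 2) * score_multiple[str(num)]
--             for i in range(len(dice)):
--                 if(dice[i] == num):
--                     dice[i] = 0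
--     return score, dice
-- ===== SOURCE B (Python) =====
-- score_multiple = {"1":1000, "2":200, "3":300, "4":400, "5":500, "6":600}
--
-- def scoreMultiples(dice):
--     # One counting pass into a face-keyed frequency table, then one scoring
--     # pass over the table and one rewrite pass over the list.
--     freq = {num: 0 for num in range(1, 7)}
--     for d in dice:
--         if d in freq:
--             freq[d] += 1
--     score = 0
--     hot = set()
--     for num, cnt in freq.items():
--         if cnt > 2:
--             score += (cnt - 2) * score_multiple[str(num)]
--             hot.add(num)
--     dice[:] = [0 if d in hot else d for d in dice]
--     return score, dice
-- ===== Notes on version B (the rewrite author's own statement) =====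
-- stated objective: alternative
-- what changed: A makes six passes over the dice (copying and mutate-as-you-count per face, then a zeroing pass per hot face); B builds a face-keyed frequency table in one counting pass, derives score and the set of hot faces from the table's six entries, and rewrites the list in a single pass.
import Mathlib
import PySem

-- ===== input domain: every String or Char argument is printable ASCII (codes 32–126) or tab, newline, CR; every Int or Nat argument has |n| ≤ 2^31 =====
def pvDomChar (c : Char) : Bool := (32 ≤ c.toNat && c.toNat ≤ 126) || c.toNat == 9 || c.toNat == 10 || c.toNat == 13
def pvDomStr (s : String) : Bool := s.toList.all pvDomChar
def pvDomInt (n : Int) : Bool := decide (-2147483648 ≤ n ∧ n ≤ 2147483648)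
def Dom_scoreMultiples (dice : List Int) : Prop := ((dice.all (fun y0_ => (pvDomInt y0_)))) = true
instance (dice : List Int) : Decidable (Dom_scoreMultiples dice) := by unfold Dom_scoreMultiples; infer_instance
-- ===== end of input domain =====

-- B replaces A's six mutate-as-you-count passes by one counting pass into a face-keyed
-- frequency table, a scan of its six entries for score and hot faces, and a single
-- rewrite pass (objective: alternative). Both Pythons mutate `dice` in place
-- identically; the theorems are about the returned value.

-- shared module constant: score_multiple = {"1":1000, …, "6":600}
def scoreMultipleDict : PySem.Dict String Int :=
  PySem.Dict.ofList [("1",1000),("2",200),("3",300),("4",400),("5",500),("6",600)]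

-- score_multiple[str(num)]; the key is always present for num ∈ 1..6, so getD 0 is exact there
def multOf (n : Int) : Int := (scoreMultipleDict.get? (PySem.Int.toStr n)).getD 0

-- ===== PORT A =====
-- inner loop: for i in range(len(dice_copy)): if dice_copy[i]==num: count+=1; dice_copy[i]=0
def innerA (num : Int) : List Int → Int × List Int
  | [] => (0, [])
  | x :: xs =>
    let r := innerA num xs
    if x = num then (r.1 + 1, 0 :: r.2) else (r.1, x :: r.2)

-- zeroing loop: for i in range(len(dice)): if dice[i]==num: dice[i]=0
def zeroA (num : Int) : List Int → List Int
  | [] => []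
  | x :: xs => (if x = num then 0 else x) :: zeroA num xs

def stepA (st : Int × List Int) (num : Int) : Int × List Int :=
  let count := (innerA num st.2).1
  if 2 < count then (st.1 + (count - 2) * multOf num, zeroA num st.2) else st

def scoreMultiples (dice : List Int) : Int × List Int :=
  (PySem.List.pyRange 1 7 1).foldl stepA (0, dice)

-- ===== PORT B =====
-- freq = {num: 0 for num in range(1, 7)}
def seedFreq : PySem.Dict Int Int :=
  PySem.Dict.ofList ((PySem.List.pyRange 1 7 1).map (fun n => (n, 0)))

-- for d in dice: if d in freq: freq[d] += 1
def freqB (dice : List Int) : PySem.Dict Int Int :=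
  dice.foldl (fun f x => if f.contains x then f.modify x 0 (· + 1) else f) seedFreq

-- for num, cnt in freq.items(): if cnt > 2: score += (cnt-2)*score_multiple[str(num)]; hot.add(num)
def stepB (st : Int × PySem.Set Int) (p : Int × Int) : Int × PySem.Set Int :=
  if 2 < p.2 then (st.1 + (p.2 - 2) * multOf p.1, PySem.Set.add st.2 p.1) else st

def scoreMultiples_alt (dice : List Int) : Int × List Int :=
  let st := (freqB dice).items.foldl stepB (0, (PySem.Set.empty : PySem.Set Int))
  (st.1, dice.map (fun d => if PySem.Set.contains st.2 d then 0 else d))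

-- ===== PRECONDITION & SPEC =====
def Spec_scoreMultiples (dice : List Int) (out : Int × List Int) : Prop := out = scoreMultiples_alt dice
instance (dice : List Int) (out : Int × List Int) : Decidable (Spec_scoreMultiples dice out) := by unfold Spec_scoreMultiples; infer_instance

-- ===== CLAIM (what is proved, stated in full; the proofs are below) =====
def Claim_equal_scoreMultiples : Prop := ∀ (dice : List Int), Dom_scoreMultiples dice → Spec_scoreMultiples dice (scoreMultiples dice)

-- ===== LEMMAS AND PROOFS =====

-- "x zeroed if it lies in S"
def zf (S : List Int) (x : Int) : Int := if x ∈ S then 0 else x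

lemma innerA_count (num : Int) (d : List Int) : (innerA num d).1 = (d.count num : Int) := by
  induction d with
  | nil => simp [innerA]
  | cons x xs ih =>
    by_cases h : x = num <;> simp [innerA, h, ih]

lemma zeroA_eq_map (num : Int) (d : List Int) :
    zeroA num d = d.map (fun x => if x = num then 0 else x) := by
  induction d with
  | nil => simp [zeroA]
  | cons x xs ih => simp [zeroA, ih]

lemma count_map_zf (S : List Int) (d : List Int) (n : Int) (h0 : n ≠ 0) (hS : n ∉ S) :
    (d.map (zf S)).count n = d.count n := by
  induction d with
  | nil => simp
  | cons x xs ih =>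
    by_cases hx : x ∈ S
    · have hxn : x ≠ n := fun h => hS (h ▸ hx)
      simp [zf, hx, ih, Ne.symm h0, hxn]
    · simp [List.count_cons, zf, hx, ih]

lemma zf_step (S : List Int) (n x : Int) :
    (if zf S x = n then 0 else zf S x) = zf (S ++ [n]) x := by
  by_cases hx : x ∈ S
  · simp only [zf, if_pos hx, if_pos (show x ∈ S ++ [n] by simp [hx])]
    split_ifs <;> rfl
  · by_cases hxn : x = n
    · simp only [zf, if_neg hx]
      rw [if_pos hxn, if_pos (show x ∈ S ++ [n] by simp [hxn])]
    · simp [zf, hx, hxn]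

-- A's per-face fold: score accumulates over hot faces, the list is zeroed at the hot faces
lemma foldA_inv (nums : List Int) (S : List Int) (s : Int) (dice : List Int)
    (hne : ∀ n ∈ nums, n ≠ 0 ∧ n ∉ S) (hpw : nums.Pairwise (· ≠ ·)) :
    nums.foldl stepA (s, dice.map (zf S)) =
      ( (nums.filter (fun n => 2 < (dice.count n : Int))).foldl
          (fun acc n => acc + ((dice.count n : Int) - 2) * multOf n) s,
        dice.map (zf (S ++ nums.filter (fun n => 2 < (dice.count n : Int)))) ) := by
  induction nums generalizing S s with
  | nil => simp
  | cons n rest ih =>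
    obtain ⟨hn0, hnS⟩ := hne n (by simp)
    have hcnt : (innerA n (dice.map (zf S))).1 = (dice.count n : Int) := by
      rw [innerA_count, count_map_zf S dice n hn0 hnS]
    have hz : zeroA n (dice.map (zf S)) = dice.map (zf (S ++ [n])) := by
      rw [zeroA_eq_map, List.map_map]
      exact List.map_congr_left (fun x _ => zf_step S n x)
    have hrest : ∀ m ∈ rest, m ≠ 0 ∧ m ∉ S ++ [n] := by
      intro m hm
      obtain ⟨hm0, hmS⟩ := hne m (by simp [hm])
      have hmn : n ≠ m := (List.pairwise_cons.mp hpw).1 m hm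
      simp [hm0, hmS, Ne.symm hmn]
    have hpw' : rest.Pairwise (· ≠ ·) := (List.pairwise_cons.mp hpw).2
    by_cases hc : 2 < (dice.count n : Int)
    · have hstep : stepA (s, dice.map (zf S)) n
          = (s + ((dice.count n : Int) - 2) * multOf n, dice.map (zf (S ++ [n]))) := by
        simp only [stepA, hcnt, if_pos hc, hz]
      rw [List.foldl_cons, hstep, ih (S ++ [n]) _ hrest hpw']
      have hcN : 2 < dice.count n := by omega
      simp [hcN, List.append_assoc]
    · have hstep : stepA (s, dice.map (zf S)) n = (s, dice.map (zf S)) := by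
        simp only [stepA, hcnt, if_neg hc]
      rw [List.foldl_cons, hstep,
        ih S s (fun m hm => hne m (List.mem_cons_of_mem _ hm)) hpw']
      have hcN : ¬ 2 < dice.count n := by omega
      simp [hcN]

lemma keys_freq_fold (l : List Int) (f : PySem.Dict Int Int) :
    (l.foldl (fun f x => if f.contains x then f.modify x 0 (· + 1) else f) f).keys = f.keys := by
  induction l generalizing f with
  | nil => rfl
  | cons x xs ih =>
    rw [List.foldl_cons, ih]
    by_cases h : f.contains x = true
    · simp [h, PySem.Dict.keys_insert_of_contains]
    · rw [if_neg h]

-- the counting fold counts occurrences of each seeded key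
lemma getD_freq_fold (l : List Int) (f : PySem.Dict Int Int) (n : Int)
    (hn : f.contains n = true) :
    (l.foldl (fun f x => if f.contains x then f.modify x 0 (· + 1) else f) f).getD n 0
      = f.getD n 0 + (l.count n : Int) := by
  induction l generalizing f with
  | nil => simp
  | cons x xs ih =>
    rw [List.foldl_cons]
    by_cases hx : f.contains x = true
    · have hn' : (f.modify x 0 (· + 1)).contains n = true := by
        simp [PySem.Dict.contains_modify, hn]
      rw [if_pos hx, ih _ hn', PySem.Dict.getD_modify]
      by_cases hxn : n = x
      · subst hxn
        simp
        ring
      · simp [hxn, Ne.symm hxn]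
    · have hxn : x ≠ n := fun h => hx (h ▸ hn)
      rw [if_neg hx, ih _ hn]
      simp [hxn]

-- freq.items = [(1, count 1), …, (6, count 6)]
lemma items_freqB (dice : List Int) :
    (freqB dice).items = [1, 2, 3, 4, 5, 6].map (fun n => (n, (dice.count n : Int))) := by
  have hkeys : (freqB dice).keys = [1, 2, 3, 4, 5, 6] := by
    rw [freqB, keys_freq_fold]
    decide
  have hnd : (freqB dice).keys.Nodup := by rw [hkeys]; decide
  rw [PySem.Dict.items_eq_map_keys _ hnd 0, hkeys]
  apply List.map_congr_left
  intro n hn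
  have hc : seedFreq.contains n = true := by
    fin_cases hn <;> decide
  have h0 : seedFreq.getD n 0 = 0 := by
    fin_cases hn <;> decide
  rw [freqB, getD_freq_fold _ _ _ hc, h0, zero_add]

-- B's table scan: score accumulates over hot faces, the set collects them in order
lemma foldB_inv (nums : List Int) (S : PySem.Set Int) (s : Int) (dice : List Int)
    (hnS : ∀ n ∈ nums, n ∉ S) (hpw : nums.Pairwise (· ≠ ·)) :
    (nums.map (fun n => (n, (dice.count n : Int)))).foldl stepB (s, S) =
      ( (nums.filter (fun n => 2 < (dice.count n : Int))).foldl
          (fun acc n => acc + ((dice.count n : Int) - 2) * multOf n) s,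
        S ++ nums.filter (fun n => 2 < (dice.count n : Int)) ) := by
  induction nums generalizing S s with
  | nil => simp
  | cons n rest ih =>
    have hrest : ∀ m ∈ rest, m ∉ S ++ [n] := by
      intro m hm
      have hmn : n ≠ m := (List.pairwise_cons.mp hpw).1 m hm
      simp [hnS m (by simp [hm]), Ne.symm hmn]
    have hpw' : rest.Pairwise (· ≠ ·) := (List.pairwise_cons.mp hpw).2
    by_cases hc : 2 < (dice.count n : Int)
    · have hadd : PySem.Set.add S n = S ++ [n] := by
        exact PySem.Set.add_of_not_mem (hnS n (by simp))
      rw [List.map_cons, List.foldl_cons,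
        show stepB (s, S) (n, (dice.count n : Int))
            = (s + ((dice.count n : Int) - 2) * multOf n, S ++ [n]) by
          simp [stepB, hc, hadd],
        ih (S ++ [n]) _ hrest hpw']
      have hcN : 2 < dice.count n := by omega
      simp [hcN, List.append_assoc]
    · rw [List.map_cons, List.foldl_cons,
        show stepB (s, S) (n, (dice.count n : Int)) = (s, S) by simp [stepB, hc],
        ih S s (fun m hm => hnS m (List.mem_cons_of_mem _ hm)) hpw']
      have hcN : ¬ 2 < dice.count n := by omega
      simp [hcN]

lemma map_zf_eq_contains (L d : List Int) :
    d.map (zf L) = d.map (fun x => if PySem.Set.contains (L : PySem.Set Int) x then 0 else x) := by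
  apply List.map_congr_left
  intro x _
  by_cases hx : x ∈ L <;> simp [zf, hx]

-- ===== VERDICT (by name: the statement is the Claim_ definition above) =====
theorem scoreMultiples_spec : Claim_equal_scoreMultiples := by
  intro dice _
  show scoreMultiples dice = scoreMultiples_alt dice
  have hr : PySem.List.pyRange 1 7 1 = [1, 2, 3, 4, 5, 6] := by decide
  have hzf : dice.map (zf []) = dice := by
    have hid : zf [] = fun x : Int => x := by funext x; simp [zf]
    rw [hid]; simp
  have hA := foldA_inv [1, 2, 3, 4, 5, 6] [] 0 dice (by decide) (by decide)
  rw [hzf] at hA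
  have hB := foldB_inv [1, 2, 3, 4, 5, 6] PySem.Set.empty 0 dice (by decide) (by decide)
  unfold scoreMultiples scoreMultiples_alt
  rw [hr, hA, items_freqB, hB]
  simp only [PySem.Set.empty, List.nil_append]
  rw [map_zf_eq_contains]
  rfl
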